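-- pv_equiv track=rewrite | github.com/levlai/chiralipy | chiralipy/rings/detection.py | find_ring_systems
-- ===== SOURCE A (Python) =====
-- def find_ring_systems(rings: list[set[int]]) -> list[list[set[int]]]:
--     """Group rings into fused ring systems.
--
--     Two rings are considered fused if they share at least 2 atoms (a bond).
--
--     Args:
--         rings: List of rings as atom index sets.
--
--     Returns:
--         List of ring systems, each containing fused rings.
--
--     Example:
--         >>> mol = parse("c1ccc2ccccc2c1")  # naphthalene
--         >>> rings = find_sssr(mol)
--         >>> systems = find_ring_systems(rings)
--         >>> len(systems)  # naphthalene has one fused system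
--         1
--         >>> len(systems[0])  # containing 2 rings
--         2
--     """
--     if not rings:
--         return []
--
--     n = len(rings)
--     parent = list(range(n))
--
--     def find(x: int) -> int:
--         if parent[x] != x:
--             parent[x] = find(parent[x])
--         return parent[x]
--
--     def union(x: int, y: int) -> None:
--         px, py = find(x), find(y)
--         if px != py:
--             parent[px] = py
--
--     # Union rings that share at least 2 atoms (a bond)
--     for i in range(n):
--         for j in range(i + 1, n):
--             if len(rings[i] & rings[j]) >= 2:
--                 union(i, j)
--
--     # Group by parent
--     systems: dict[int, list[set[int]]] = {}
--     for i in range(n):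
--         p = find(i)
--         if p not in systems:
--             systems[p] = []
--         systems[p].append(rings[i])
--
--     return list(systems.values())
-- ===== SOURCE B (Python) =====
-- def find_ring_systems(rings: list[set[int]]) -> list[list[set[int]]]:
--     """Group rings into fused ring systems (rings fused = share >= 2 atoms).
--
--     Instead of intersecting every pair of rings, index rings by atom and
--     tally shared-atom counts only for pairs that co-occur at some atom.
--     """
--     if not rings:
--         return []
--
--     n = len(rings)
--
--     # atom -> ascending list of indices of rings containing it
--     atom_to_rings: dict[int, list[int]] = {}
--     for i, ring in enumerate(rings):
--         for a in ring:
--             atom_to_rings[a] = atom_to_rings.get(a, []) + [i]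
--
--     # (u, v) with u < v -> number of shared atoms, kept as nested dicts
--     shared: dict[int, dict[int, int]] = {}
--     for members in atom_to_rings.values():
--         rest = members
--         while rest:
--             u, rest = rest[0], rest[1:]
--             for v in rest:
--                 inner = shared.get(u, {})
--                 inner[v] = inner.get(v, 0) + 1
--                 shared[u] = inner
--
--     parent = list(range(n))
--
--     def find(x: int) -> int:
--         if parent[x] != x:
--             parent[x] = find(parent[x])
--         return parent[x]
--
--     def union(x: int, y: int) -> None:
--         px, py = find(x), find(y)
--         if px != py:
--             parent[px] = py
--
--     for u in range(n):
--         for v in sorted(shared.get(u, {})):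
--             if shared[u][v] >= 2:
--                 union(u, v)
--
--     systems: dict[int, list[set[int]]] = {}
--     for i in range(n):
--         p = find(i)
--         if p not in systems:
--             systems[p] = []
--         systems[p].append(rings[i])
--
--     return list(systems.values())
-- ===== Notes on version B (the rewrite author's own statement) =====
-- stated objective: faster
-- what changed: Instead of intersecting every pair of rings (O(n^2) pairwise set intersections), B builds an atom->rings index once and tallies shared-atom counts only for ring pairs that actually co-occur at some atom, then runs the same union-find on pairs with count >= 2 and groups identically.
import Mathlib
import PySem

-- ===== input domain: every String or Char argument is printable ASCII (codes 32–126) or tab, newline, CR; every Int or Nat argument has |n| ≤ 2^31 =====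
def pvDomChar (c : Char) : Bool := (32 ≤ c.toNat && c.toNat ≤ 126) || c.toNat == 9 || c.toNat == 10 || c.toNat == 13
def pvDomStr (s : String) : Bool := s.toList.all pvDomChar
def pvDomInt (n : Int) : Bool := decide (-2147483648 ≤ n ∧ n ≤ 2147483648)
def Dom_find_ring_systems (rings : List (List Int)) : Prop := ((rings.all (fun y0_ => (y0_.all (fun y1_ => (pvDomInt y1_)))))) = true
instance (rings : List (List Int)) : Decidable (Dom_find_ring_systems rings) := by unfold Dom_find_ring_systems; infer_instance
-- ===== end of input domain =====

-- B replaces A's O(n²·s) all-pairs set intersections by an atom→rings index with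
-- shared-atom tallies per co-occurring ring pair; the union-find over the resulting
-- fused pairs and the grouping are the identical Python lines in both programs and
-- are ported once as shared helpers (pvFind / pvUnion / pvGroup).

-- shared helper: Python's nested `find` with path compression (identical in Source A and Source B).
-- fuel (length+1) only makes the recursion structural; it is never exhausted on the
-- parent forests the two programs build.
def pvFind : Nat → List Int → Int → List Int × Int
  | 0, parent, x => (parent, x)
  | fuel+1, parent, x =>
    let px := PySem.List.pyGetD parent x x
    if px ≠ x then
      let r := pvFind fuel parent px
      (PySem.List.pySetD r.1 x r.2, r.2)
    else (parent, x)

-- shared helper: Python's nested `union` (identical in Source A and Source B)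
def pvUnion (parent : List Int) (x y : Int) : List Int :=
  let r1 := pvFind (parent.length + 1) parent x
  let r2 := pvFind (r1.1.length + 1) r1.1 y
  if r1.2 ≠ r2.2 then PySem.List.pySetD r2.1 r1.2 r2.2 else r2.1

-- shared helper: the final group-by-root loop (identical in Source A and Source B)
def pvGroup (rings : List (List Int)) (parent0 : List Int) : List (List (List Int)) :=
  let res := (PySem.List.pyRange 0 (rings.length : Int) 1).foldl
    (fun (st : List Int × PySem.Dict Int (List (List Int))) i =>
      let f := pvFind (st.1.length + 1) st.1 i
      (f.1, st.2.modify f.2 [] (fun l => l ++ [PySem.List.pyGetD rings i []])))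
    (parent0, PySem.Dict.empty)
  res.2.values

-- ===== PORT A =====
def find_ring_systems (rings : List (List Int)) : List (List (List Int)) :=
  if rings = [] then []
  else
    -- parent = list(range(n));
    -- for i in range(n): for j in range(i+1, n): if len(rings[i] & rings[j]) >= 2: union(i, j)
    pvGroup rings
      ((PySem.List.pyRange 0 (rings.length : Int) 1).foldl (fun parent i =>
        (PySem.List.pyRange (i+1) (rings.length : Int) 1).foldl (fun parent j =>
          if 2 ≤ PySem.Set.len (PySem.Set.inter (PySem.List.pyGetD rings i [])
                                                (PySem.List.pyGetD rings j []))
          then pvUnion parent i j else parent) parent)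
        (PySem.List.pyRange 0 (rings.length : Int) 1))

-- ===== PORT B =====
-- Source B: atom -> ascending list of indices of rings containing it
def pvAtomIndex (rings : List (List Int)) : PySem.Dict Int (List Int) :=
  (PySem.List.enumerate rings).foldl
    (fun d p => p.2.foldl (fun d a => d.modify a [] (fun l => l ++ [p.1])) d)
    PySem.Dict.empty

-- Source B: the 'while rest:' tally loop over one members list
def pvTally (shared : PySem.Dict Int (PySem.Dict Int Int)) :
    List Int → PySem.Dict Int (PySem.Dict Int Int)
  | [] => shared
  | u :: rest =>
      pvTally (rest.foldl
        (fun sh v => sh.modify u PySem.Dict.empty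
          (fun inner => inner.insert v (inner.getD v 0 + 1))) shared) rest

-- Source B: shared[u][v] = number of atoms shared by rings u < v (only co-occurring pairs)
def pvSharedCounts (rings : List (List Int)) : PySem.Dict Int (PySem.Dict Int Int) :=
  (pvAtomIndex rings).values.foldl (fun sh members => pvTally sh members) PySem.Dict.empty

def find_ring_systems_alt (rings : List (List Int)) : List (List (List Int)) :=
  if rings = [] then []
  else
    -- parent = list(range(n));
    -- for u in range(n): for v in sorted(shared.get(u, {})): if shared[u][v] >= 2: union(u, v)
    pvGroup rings
      ((PySem.List.pyRange 0 (rings.length : Int) 1).foldl (fun parent u =>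
        (PySem.List.sorted ((pvSharedCounts rings).getD u PySem.Dict.empty).keys
            (fun v => v) false).foldl
          (fun parent v =>
            if 2 ≤ ((pvSharedCounts rings).getD u PySem.Dict.empty).getD v 0
            then pvUnion parent u v else parent) parent)
        (PySem.List.pyRange 0 (rings.length : Int) 1))

-- ===== PRECONDITION & SPEC =====
-- Pre_ is the List-encoding invariant of the Python argument type list[set[int]]:
-- each inner list holds the DISTINCT elements of a set (duplicates are not expressible
-- as a Python set, so Pre_ excludes no Python-reachable input).
def Pre_find_ring_systems (rings : List (List Int)) : Prop := ∀ r ∈ rings, r.Nodup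
instance (rings : List (List Int)) : Decidable (Pre_find_ring_systems rings) := by
  unfold Pre_find_ring_systems; infer_instance

def pvWitness_find_ring_systems : List (List Int) := [[1, 2, 3], [2, 3, 4], [7]]

def Spec_find_ring_systems (rings : List (List Int)) (out : List (List (List Int))) : Prop :=
  out = find_ring_systems_alt rings
instance (rings : List (List Int)) (out : List (List (List Int))) : Decidable (Spec_find_ring_systems rings out) := by unfold Spec_find_ring_systems; infer_instance

-- ===== CLAIM (what is proved, stated in full; the proofs are below) =====
def Claim_equal_find_ring_systems : Prop := ∀ (rings : List (List Int)), Dom_find_ring_systems rings → Pre_find_ring_systems rings → Spec_find_ring_systems rings (find_ring_systems rings)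

-- ===== LEMMAS AND PROOFS =====

-- proof-side views of B's two dictionaries as folds over flat pair lists
def pvFlatPairs (rings : List (List Int)) : List (Int × Int) :=
  (PySem.List.enumerate rings).flatMap (fun p => p.2.map (fun a => (a, p.1)))

def pvMembers (rings : List (List Int)) (a : Int) : List Int :=
  ((pvFlatPairs rings).filter (fun p => p.1 == a)).map (·.2)

def pvPairsOf : List Int → List (Int × Int)
  | [] => []
  | u :: rest => rest.map (fun v => (u, v)) ++ pvPairsOf rest

def pvStep (d : PySem.Dict Int (PySem.Dict Int Int)) (p : Int × Int) :
    PySem.Dict Int (PySem.Dict Int Int) :=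
  d.modify p.1 PySem.Dict.empty (fun inner => inner.insert p.2 (inner.getD p.2 0 + 1))

def pvPB (rings : List (List Int)) : List (Int × Int) :=
  (pvAtomIndex rings).values.flatMap pvPairsOf

def pvLu (rings : List (List Int)) (u : Int) : List Int :=
  ((pvPB rings).filter (fun p => p.1 == u)).map (·.2)

-- the two ring-index lists the union loops traverse for a fixed smaller index u
def pvLA (rings : List (List Int)) (u : Int) : List Int :=
  (PySem.List.pyRange (u+1) (rings.length : Int) 1).filter (fun j =>
    decide (2 ≤ PySem.Set.len (PySem.Set.inter (PySem.List.pyGetD rings u [])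
                                               (PySem.List.pyGetD rings j []))))

def pvLB (rings : List (List Int)) (u : Int) : List Int :=
  (PySem.List.sorted ((pvSharedCounts rings).getD u PySem.Dict.empty).keys (fun v => v) false).filter
    (fun v => decide (2 ≤ ((pvSharedCounts rings).getD u PySem.Dict.empty).getD v 0))

lemma pvAtomIndex_eq_flat (rings : List (List Int)) :
    pvAtomIndex rings =
      (pvFlatPairs rings).foldl (fun d q => d.modify q.1 [] (fun l => l ++ [q.2])) PySem.Dict.empty := by
  unfold pvAtomIndex pvFlatPairs
  rw [List.foldl_flatMap]
  apply PySem.List.foldl_congr_mem'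
  intro p _ d
  rw [List.foldl_map]

lemma pvAtomIndex_getD (rings : List (List Int)) (a : Int) :
    (pvAtomIndex rings).getD a [] = pvMembers rings a := by
  rw [pvAtomIndex_eq_flat, PySem.Dict.getD_foldl_modify_append]
  simp [pvMembers, PySem.Dict.getD_empty]

lemma pvAtomIndex_keys (rings : List (List Int)) :
    (pvAtomIndex rings).keys = PySem.Set.ofList ((pvFlatPairs rings).map (·.1)) := by
  rw [pvAtomIndex_eq_flat,
    PySem.Dict.keys_foldl_modify_key (pvFlatPairs rings) (fun q => q.1) []
      (fun _ q => fun l => l ++ [q.2]) PySem.Dict.empty]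
  simp [PySem.Set.update_nil_left, PySem.Dict.keys_empty]

lemma mem_pvMembers (rings : List (List Int)) (a v : Int) :
    v ∈ pvMembers rings a ↔ ∃ k : Nat, ∃ h : k < rings.length, v = (k : Int) ∧ a ∈ rings[k] := by
  unfold pvMembers pvFlatPairs
  simp only [List.mem_map, List.mem_filter, List.mem_flatMap, PySem.List.mem_enumerate_iff]
  constructor
  · rintro ⟨p, ⟨⟨q, hq_mem, hq⟩, hpa⟩, rfl⟩
    obtain ⟨k, hk, rfl⟩ := hq_mem
    obtain ⟨a', ha', rfl⟩ := hq
    simp only [beq_iff_eq] at hpa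
    subst hpa
    exact ⟨k, hk, by simp, ha'⟩
  · rintro ⟨k, hk, rfl, ha⟩
    exact ⟨(a, 0 + (k : Int)), ⟨⟨(0 + (k : Int), rings[k]), ⟨k, hk, rfl⟩, ⟨a, ha, rfl⟩⟩, by simp⟩, by simp⟩

lemma pvMembers_pairwise (rings : List (List Int)) (h : ∀ r ∈ rings, r.Nodup) (a : Int) :
    (pvMembers rings a).Pairwise (· < ·) := by
  have hshort : ∀ (l : List Int), l.length ≤ 1 → l.Pairwise (· < ·) := by
    intro l hl
    match l, hl with
    | [], _ => exact List.Pairwise.nil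
    | [x], _ => simp
  unfold pvMembers pvFlatPairs
  rw [List.filter_flatMap, List.map_flatMap]
  rw [List.pairwise_flatMap]
  constructor
  · intro p hp
    apply hshort
    rw [List.filter_map]
    have hnd : p.2.Nodup := by
      rw [PySem.List.mem_enumerate_iff] at hp
      obtain ⟨k, hk, rfl⟩ := hp
      exact h _ (List.getElem_mem hk)
    have h1 : (p.2.filter ((fun q : Int × Int => q.1 == a) ∘ (fun x => (x, p.1)))).length ≤ 1 := by
      have h2 : (p.2.filter (fun x => x == a)).length = p.2.count a :=
        Eq.symm List.count_eq_length_filter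
      have h3 : p.2.count a ≤ 1 := List.nodup_iff_count_le_one.1 hnd a
      calc (p.2.filter ((fun q : Int × Int => q.1 == a) ∘ (fun x => (x, p.1)))).length
          = (p.2.filter (fun x => x == a)).length := by
            congr 1
        _ ≤ 1 := h2 ▸ h3
    simpa using h1
  · have hpl := PySem.List.pairwise_lt_enumerate rings 0
    refine hpl.imp ?_
    intro p q hpq x hx y hy
    have hxp : x = p.1 := by
      simp only [List.mem_map, List.mem_filter, List.mem_map] at hx
      obtain ⟨r, ⟨⟨a', _, rfl⟩, _⟩, rfl⟩ := hx
      rfl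
    have hyq : y = q.1 := by
      simp only [List.mem_map, List.mem_filter, List.mem_map] at hy
      obtain ⟨r, ⟨⟨a', _, rfl⟩, _⟩, rfl⟩ := hy
      rfl
    rw [hxp, hyq]
    exact hpq

lemma pvTally_eq (l : List Int) (sh : PySem.Dict Int (PySem.Dict Int Int)) :
    pvTally sh l = (pvPairsOf l).foldl pvStep sh := by
  induction l generalizing sh with
  | nil => rfl
  | cons u rest ih =>
    simp only [pvTally, pvPairsOf, List.foldl_append, List.foldl_map]
    rw [ih]
    rfl

lemma pvSharedCounts_eq_flat (rings : List (List Int)) :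
    pvSharedCounts rings = (pvPB rings).foldl pvStep PySem.Dict.empty := by
  unfold pvSharedCounts pvPB
  rw [List.foldl_flatMap]
  apply PySem.List.foldl_congr_mem'
  intro m _ sh
  exact pvTally_eq m sh

lemma tally_getD (P : List (Int × Int)) (d : PySem.Dict Int (PySem.Dict Int Int)) (u : Int) :
    (P.foldl pvStep d).getD u PySem.Dict.empty =
      ((P.filter (fun p => p.1 == u)).map (·.2)).foldl
        (fun inner v => inner.insert v (inner.getD v 0 + 1)) (d.getD u PySem.Dict.empty) := by
  induction P generalizing d with
  | nil => rfl
  | cons p P ih =>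
    rw [List.foldl_cons, ih]
    by_cases hup : u = p.1
    · have hb : (p.1 == u) = true := by simp [hup.symm]
      have hd : (pvStep d p).getD u PySem.Dict.empty
          = (d.getD u PySem.Dict.empty).insert p.2 ((d.getD u PySem.Dict.empty).getD p.2 0 + 1) := by
        unfold pvStep
        rw [PySem.Dict.getD_modify, if_pos hup, hup]
      simp only [List.filter_cons, hb, if_true, List.map_cons, List.foldl_cons, hd]
    · have hb : (p.1 == u) = false := by
        simp only [beq_eq_false_iff_ne]
        exact fun e => hup e.symm
      have hd : (pvStep d p).getD u PySem.Dict.empty = d.getD u PySem.Dict.empty := by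
        unfold pvStep
        rw [PySem.Dict.getD_modify, if_neg hup]
      simp only [List.filter_cons, hb, Bool.false_eq_true, if_false, hd]

lemma shared_getD_getD (rings : List (List Int)) (u v : Int) :
    ((pvSharedCounts rings).getD u PySem.Dict.empty).getD v 0 = ((pvLu rings u).count v : Int) := by
  rw [pvSharedCounts_eq_flat, tally_getD, PySem.Dict.getD_foldl_insert_add_one]
  simp [pvLu, PySem.Dict.getD_empty]

lemma shared_keys (rings : List (List Int)) (u : Int) :
    ((pvSharedCounts rings).getD u PySem.Dict.empty).keys = PySem.Set.ofList (pvLu rings u) := by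
  rw [pvSharedCounts_eq_flat, tally_getD, PySem.Dict.keys_foldl_insert]
  simp [pvLu, PySem.Dict.getD_empty, PySem.Set.update_nil_left]

lemma count_filter_map_snd (P : List (Int × Int)) (u v : Int) :
    ((P.filter (fun p => p.1 == u)).map (·.2)).count v = P.count (u, v) := by
  induction P with
  | nil => rfl
  | cons p P ih =>
    obtain ⟨p1, p2⟩ := p
    by_cases h1 : p1 = u <;> by_cases h2 : p2 = v <;>
      simp [ih, h1, h2, Prod.mk.injEq]

lemma count_map_pair (rest : List Int) (w u v : Int) :
    (rest.map (fun x => (w, x))).count (u, v) = if w = u then rest.count v else 0 := by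
  induction rest with
  | nil => simp
  | cons r rest ih =>
    simp only [List.map_cons, List.count_cons, ih]
    by_cases h : w = u <;> by_cases h2 : r = v <;>
      simp [h, h2, Prod.mk.injEq]

lemma pvPairsOf_count (l : List Int) (hl : l.Pairwise (· < ·)) (u v : Int) :
    (pvPairsOf l).count (u, v) = if u ∈ l ∧ v ∈ l ∧ u < v then 1 else 0 := by
  induction l with
  | nil => simp [pvPairsOf]
  | cons w rest ih =>
    rw [List.pairwise_cons] at hl
    obtain ⟨hw, hrest⟩ := hl
    have hnd : rest.Nodup := hrest.imp (fun h => ne_of_lt h)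
    have hwnot : w ∉ rest := fun hmem => absurd (hw _ hmem) (lt_irrefl w)
    simp only [pvPairsOf, List.count_append, count_map_pair, ih hrest]
    by_cases hwu : w = u
    · subst hwu
      by_cases hv : v ∈ rest
      · have hvw : w < v := hw _ hv
        have hnr : ¬ (w ∈ rest ∧ v ∈ rest ∧ w < v) := fun ⟨hc, _, _⟩ => hwnot hc
        have hc : w ∈ w :: rest ∧ v ∈ w :: rest ∧ w < v := ⟨by simp, by simp [hv], hvw⟩
        rw [if_pos rfl, if_neg hnr, if_pos hc, List.count_eq_one_of_mem hnd hv]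
      · have hnr : ¬ (w ∈ rest ∧ v ∈ rest ∧ w < v) := fun ⟨hc, _, _⟩ => hwnot hc
        have hnc : ¬ (w ∈ w :: rest ∧ v ∈ w :: rest ∧ w < v) := by
          rintro ⟨-, hvm, hlt⟩
          rcases List.mem_cons.1 hvm with h | h
          · exact absurd (h ▸ hlt) (lt_irrefl w)
          · exact hv h
        rw [if_pos rfl, if_neg hnr, if_neg hnc, List.count_eq_zero_of_not_mem hv]
    · rw [if_neg hwu, zero_add]
      have hiff : (u ∈ rest ∧ v ∈ rest ∧ u < v) ↔ (u ∈ w :: rest ∧ v ∈ w :: rest ∧ u < v) := by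
        constructor
        · rintro ⟨h1, h2, h3⟩
          exact ⟨List.mem_cons_of_mem _ h1, List.mem_cons_of_mem _ h2, h3⟩
        · rintro ⟨h1, h2, h3⟩
          have hu : u ∈ rest := by
            rcases List.mem_cons.1 h1 with h | h
            · exact (hwu h.symm).elim
            · exact h
          have hv' : v ∈ rest := by
            rcases List.mem_cons.1 h2 with h | h
            · subst h
              exact absurd h3 (not_lt.2 (le_of_lt (hw u hu)))
            · exact h
          exact ⟨hu, hv', h3⟩
      exact if_congr hiff rfl rfl

lemma mem_pvPairsOf (l : List Int) (hl : l.Pairwise (· < ·)) (u v : Int) :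
    (u, v) ∈ pvPairsOf l ↔ u ∈ l ∧ v ∈ l ∧ u < v := by
  rw [← List.count_pos_iff, pvPairsOf_count l hl]
  split_ifs with h <;> simp [h]

lemma pvAtomIndex_values (rings : List (List Int)) :
    (pvAtomIndex rings).values =
      ((pvAtomIndex rings).keys).map (fun a => pvMembers rings a) := by
  have hnd : (pvAtomIndex rings).keys.Nodup := by
    rw [pvAtomIndex_keys]
    exact PySem.Set.nodup_ofList _
  rw [PySem.Dict.values_eq_map_keys _ hnd []]
  exact List.map_congr_left (fun a _ => pvAtomIndex_getD rings a)

lemma pvPB_count (rings : List (List Int)) (h : ∀ r ∈ rings, r.Nodup) (u v : Int) (huv : u < v) :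
    (pvPB rings).count (u, v) =
      ((pvAtomIndex rings).keys).countP (fun a => decide (u ∈ pvMembers rings a ∧ v ∈ pvMembers rings a)) := by
  have main : ∀ (vs : List (List Int)), (∀ m ∈ vs, m.Pairwise (· < ·)) →
      (vs.flatMap pvPairsOf).count (u, v) = vs.countP (fun m => decide (u ∈ m ∧ v ∈ m)) := by
    intro vs hvs
    induction vs with
    | nil => rfl
    | cons m vs ih =>
      rw [List.flatMap_cons, List.count_append,
        pvPairsOf_count m (hvs m (by simp)) u v, List.countP_cons,
        ih (fun m' hm' => hvs m' (by simp [hm']))]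
      by_cases hc : u ∈ m ∧ v ∈ m
      · have hc3 : u ∈ m ∧ v ∈ m ∧ u < v := ⟨hc.1, hc.2, huv⟩
        simp [hc, hc3]
        omega
      · have h3 : ¬ (u ∈ m ∧ v ∈ m ∧ u < v) := fun ⟨a, b, _⟩ => hc ⟨a, b⟩
        simp [hc, h3]
  unfold pvPB
  rw [pvAtomIndex_values rings]
  rw [main (((pvAtomIndex rings).keys).map (fun a => pvMembers rings a))
      (fun m hm => by
        obtain ⟨a, _, rfl⟩ := List.mem_map.1 hm
        exact pvMembers_pairwise rings h a)]
  rw [List.countP_map]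
  rfl


lemma mem_pvLu (rings : List (List Int)) (h : ∀ r ∈ rings, r.Nodup) (u v : Int) :
    v ∈ pvLu rings u ↔ ∃ m ∈ (pvAtomIndex rings).values, u ∈ m ∧ v ∈ m ∧ u < v := by
  have hpair : ∀ m ∈ (pvAtomIndex rings).values, m.Pairwise (· < ·) := by
    intro m hm
    rw [pvAtomIndex_values rings] at hm
    obtain ⟨a, _, rfl⟩ := List.mem_map.1 hm
    exact pvMembers_pairwise rings h a
  unfold pvLu
  constructor
  · intro hv
    obtain ⟨p, hp, rfl⟩ := List.mem_map.1 hv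
    obtain ⟨hpPB, hp1⟩ := List.mem_filter.1 hp
    have hp1' : p.1 = u := by simpa using hp1
    obtain ⟨m, hm, hpm⟩ := List.mem_flatMap.1 hpPB
    have hpuv : p = (u, p.2) := by
      cases p
      simp_all
    rw [hpuv] at hpm
    obtain ⟨h1, h2, h3⟩ := (mem_pvPairsOf m (hpair m hm) u p.2).1 hpm
    exact ⟨m, hm, h1, h2, h3⟩
  · rintro ⟨m, hm, h1, h2, h3⟩
    have : (u, v) ∈ pvPB rings :=
      List.mem_flatMap.2 ⟨m, hm, (mem_pvPairsOf m (hpair m hm) u v).2 ⟨h1, h2, h3⟩⟩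
    exact List.mem_map.2 ⟨(u, v), List.mem_filter.2 ⟨this, by simp⟩, rfl⟩

lemma cnt_eq_inter (rings : List (List Int)) (h : ∀ r ∈ rings, r.Nodup) (u v : Int)
    (hu : 0 ≤ u) (huv : u < v) (hv : v < (rings.length : Int)) :
    ((pvSharedCounts rings).getD u PySem.Dict.empty).getD v 0 =
      PySem.Set.len (PySem.Set.inter (PySem.List.pyGetD rings u [])
                                     (PySem.List.pyGetD rings v [])) := by
  have hv0 : 0 ≤ v := le_of_lt (lt_of_le_of_lt hu huv)
  have hun : u.toNat < rings.length := by omega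
  have hvn : v.toNat < rings.length := by omega
  have hruE : PySem.List.pyGetD rings u [] = rings[u.toNat] :=
    PySem.List.pyGetD_eq_getElem rings [] hu (lt_trans huv hv)
  have hrvE : PySem.List.pyGetD rings v [] = rings[v.toNat] :=
    PySem.List.pyGetD_eq_getElem rings [] hv0 hv
  have hmemu : ∀ a : Int, u ∈ pvMembers rings a ↔ a ∈ rings[u.toNat] := by
    intro a
    rw [mem_pvMembers]
    constructor
    · rintro ⟨k, hk, he, ha⟩
      have hk' : u.toNat = k := by omega
      subst hk'
      exact ha
    · intro ha
      exact ⟨u.toNat, hun, (Int.toNat_of_nonneg hu).symm, ha⟩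
  have hmemv : ∀ a : Int, v ∈ pvMembers rings a ↔ a ∈ rings[v.toNat] := by
    intro a
    rw [mem_pvMembers]
    constructor
    · rintro ⟨k, hk, he, ha⟩
      have hk' : v.toNat = k := by omega
      subst hk'
      exact ha
    · intro ha
      exact ⟨v.toNat, hvn, (Int.toNat_of_nonneg hv0).symm, ha⟩
  have hkeysnd : (pvAtomIndex rings).keys.Nodup := by
    rw [pvAtomIndex_keys]
    exact PySem.Set.nodup_ofList _
  have hkeys : ∀ a : Int, ∀ k : Nat, ∀ hk : k < rings.length,
      a ∈ rings[k] → a ∈ (pvAtomIndex rings).keys := by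
    intro a k hk ha
    rw [pvAtomIndex_keys]
    have : a ∈ (pvFlatPairs rings).map (·.1) := by
      refine List.mem_map.2 ⟨(a, 0 + (k : Int)), ?_, rfl⟩
      unfold pvFlatPairs
      exact List.mem_flatMap.2
        ⟨(0 + (k : Int), rings[k]),
         PySem.List.mem_enumerate_iff rings 0 _ |>.2 ⟨k, hk, rfl⟩,
         List.mem_map.2 ⟨a, ha, rfl⟩⟩
    simpa [PySem.Set.mem_ofList] using this
  have h1 : (pvLu rings u).count v = (pvPB rings).count (u, v) := by
    unfold pvLu
    exact count_filter_map_snd _ u v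
  rw [shared_getD_getD, h1, pvPB_count rings h u v huv]
  have hlen : PySem.Set.len (PySem.Set.inter (PySem.List.pyGetD rings u [])
      (PySem.List.pyGetD rings v [])) =
      (((PySem.List.pyGetD rings u []).filter
        (fun x => (PySem.List.pyGetD rings v []).contains x)).length : Int) := rfl
  rw [hlen]
  congr 1
  rw [List.countP_eq_length_filter]
  apply List.Perm.length_eq
  apply (List.perm_ext_iff_of_nodup (hkeysnd.filter _)
    ((h _ (hruE ▸ List.getElem_mem hun : PySem.List.pyGetD rings u [] ∈ rings)).filter _)).2
  intro a
  rw [List.mem_filter, List.mem_filter]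
  simp only [decide_eq_true_eq, List.contains_iff_mem]
  constructor
  · rintro ⟨hak, hau, hav⟩
    exact ⟨hruE ▸ (hmemu a).1 hau, hrvE ▸ (hmemv a).1 hav⟩
  · rintro ⟨hau, hav⟩
    have hau' : a ∈ rings[u.toNat] := hruE ▸ hau
    have hav' : a ∈ rings[v.toNat] := hrvE ▸ hav
    exact ⟨hkeys a u.toNat hun hau', (hmemu a).2 hau', (hmemv a).2 hav'⟩

lemma pvLA_eq_pvLB (rings : List (List Int)) (h : ∀ r ∈ rings, r.Nodup) (u : Int)
    (hu : 0 ≤ u) :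
    pvLA rings u = pvLB rings u := by
  have hBkeys : ((pvSharedCounts rings).getD u PySem.Dict.empty).keys
      = PySem.Set.ofList (pvLu rings u) := shared_keys rings u
  have hA : (pvLA rings u).Pairwise (· < ·) :=
    (PySem.List.pairwise_lt_pyRange_one _ _).filter _
  have hB : (pvLB rings u).Pairwise (· < ·) := by
    unfold pvLB
    rw [hBkeys]
    exact (PySem.List.sorted_ofList_pairwise_lt _).filter _
  have hmem : ∀ x, x ∈ pvLA rings u ↔ x ∈ pvLB rings u := by
    intro x
    unfold pvLA pvLB
    rw [List.mem_filter, List.mem_filter, PySem.List.mem_sorted, hBkeys]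
    simp only [PySem.Set.mem_ofList, decide_eq_true_eq, PySem.List.mem_pyRange_one]
    constructor
    · rintro ⟨⟨hx1, hx2⟩, hcond⟩
      have hux : u < x := by omega
      have hcnt := cnt_eq_inter rings h u x hu hux hx2
      have hcnt2 : (2 : Int) ≤ ((pvLu rings u).count x : Int) := by
        rw [← shared_getD_getD, hcnt]
        exact hcond
      have hpos : 0 < (pvLu rings u).count x := by omega
      exact ⟨List.count_pos_iff.1 hpos, by rw [hcnt]; exact hcond⟩
    · rintro ⟨hxLu, hcond⟩
      obtain ⟨m, hm, hum, hxm, hux⟩ := (mem_pvLu rings h u x).1 hxLu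
      have hxb : 0 ≤ x ∧ x < (rings.length : Int) := by
        rw [pvAtomIndex_values rings] at hm
        obtain ⟨a, _, rfl⟩ := List.mem_map.1 hm
        obtain ⟨k, hk, rfl, -⟩ := (mem_pvMembers rings a x).1 hxm
        constructor
        · positivity
        · exact_mod_cast hk
      have hcnt := cnt_eq_inter rings h u x hu hux hxb.2
      refine ⟨⟨by omega, hxb.2⟩, ?_⟩
      rw [← hcnt]
      exact hcond
  exact List.Perm.eq_of_pairwise
    (fun a b _ _ h1 h2 => absurd h2 (lt_asymm h1)) hA hB
    ((List.perm_ext_iff_of_nodup (hA.imp (fun hab => ne_of_lt hab))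
      (hB.imp (fun hab => ne_of_lt hab))).2 hmem)

-- ===== VERDICT (by name: the statement is the Claim_ definition above) =====
theorem find_ring_systems_spec : Claim_equal_find_ring_systems := by
  intro rings hdom hpre
  unfold Pre_find_ring_systems at hpre
  unfold Spec_find_ring_systems find_ring_systems find_ring_systems_alt
  by_cases hnil : rings = []
  · rw [if_pos hnil, if_pos hnil]
  · rw [if_neg hnil, if_neg hnil]
    refine congrArg (pvGroup rings) ?_
    apply PySem.List.foldl_congr_mem'
    intro u hu parent
    obtain ⟨hu0, -⟩ := PySem.List.mem_pyRange_one.1 hu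
    rw [PySem.List.foldl_ite_eq_foldl_filter
        (fun j => 2 ≤ PySem.Set.len (PySem.Set.inter (PySem.List.pyGetD rings u [])
                                                     (PySem.List.pyGetD rings j [])))
        (fun parent j => pvUnion parent u j),
      PySem.List.foldl_ite_eq_foldl_filter
        (fun v => 2 ≤ ((pvSharedCounts rings).getD u PySem.Dict.empty).getD v 0)
        (fun parent v => pvUnion parent u v)]
    have hLL := pvLA_eq_pvLB rings hpre u hu0
    unfold pvLA pvLB at hLL
    rw [hLL]
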